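-- pv_equiv track=rewrite | github.com/je/wcmd | wcmd/wcmd/views.py | sortedZipLongest
-- ===== SOURCE A (Python) =====
-- def sortedZipLongest(l1, l2, key1, key2, fillvalue={}):
--     l1 = iter(sorted(l1, key=lambda x: x[key1]))
--     l2 = iter(sorted(l2, key=lambda x: x[key2]))
--     u = next(l1, None)
--     v = next(l2, None)
--
--     while (u is not None) or (v is not None):
--         if u is None:
--             yield fillvalue, v
--             v = next(l2, None)
--         elif v is None:
--             yield u, fillvalue
--             u = next(l1, None)
--         elif u.get(key1) == v.get(key2):
--             yield u, v
--             u = next(l1, None)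
--             v = next(l2, None)
--         elif u.get(key1) < v.get(key2):
--             yield u, fillvalue
--             u = next(l1, None)
--         else:
--             yield fillvalue, v
--             v = next(l2, None)
-- ===== SOURCE B (Python) =====
-- def sortedZipLongest(l1, l2, key1, key2, fillvalue={}):
--     # group each sorted list into runs of equal keys, then merge-walk the runs,
--     # padding the shorter run with fillvalue
--     def runs(lst, key):
--         if not lst:
--             return []
--         k = lst[0][key]
--         i = 1
--         while i < len(lst) and lst[i][key] == k:
--             i += 1
--         return [(k, lst[:i])] + runs(lst[i:], key)
--
--     def pad(g1, g2):
--         n = max(len(g1), len(g2))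
--         return list(zip(g1 + [fillvalue] * (n - len(g1)),
--                         g2 + [fillvalue] * (n - len(g2))))
--
--     r1 = runs(sorted(l1, key=lambda x: x[key1]), key1)
--     r2 = runs(sorted(l2, key=lambda x: x[key2]), key2)
--     i = j = 0
--     while i < len(r1) and j < len(r2):
--         k1, g1 = r1[i]
--         k2, g2 = r2[j]
--         if k1 == k2:
--             yield from pad(g1, g2)
--             i += 1
--             j += 1
--         elif k1 < k2:
--             yield from pad(g1, [])
--             i += 1
--         else:
--             yield from pad([], g2)
--             j += 1
--     while i < len(r1):
--         yield from pad(r1[i][1], [])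
--         i += 1
--     while j < len(r2):
--         yield from pad([], r2[j][1])
--         j += 1
-- ===== Notes on version B (the rewrite author's own statement) =====
-- stated objective: alternative
-- what changed: Replaces A's element-wise iterator merge (comparing one element of each list at a time) by grouping each sorted list into runs of equal keys and merge-walking the run streams, padding each run pair with fillvalue (zip-longest per key).
import Mathlib
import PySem

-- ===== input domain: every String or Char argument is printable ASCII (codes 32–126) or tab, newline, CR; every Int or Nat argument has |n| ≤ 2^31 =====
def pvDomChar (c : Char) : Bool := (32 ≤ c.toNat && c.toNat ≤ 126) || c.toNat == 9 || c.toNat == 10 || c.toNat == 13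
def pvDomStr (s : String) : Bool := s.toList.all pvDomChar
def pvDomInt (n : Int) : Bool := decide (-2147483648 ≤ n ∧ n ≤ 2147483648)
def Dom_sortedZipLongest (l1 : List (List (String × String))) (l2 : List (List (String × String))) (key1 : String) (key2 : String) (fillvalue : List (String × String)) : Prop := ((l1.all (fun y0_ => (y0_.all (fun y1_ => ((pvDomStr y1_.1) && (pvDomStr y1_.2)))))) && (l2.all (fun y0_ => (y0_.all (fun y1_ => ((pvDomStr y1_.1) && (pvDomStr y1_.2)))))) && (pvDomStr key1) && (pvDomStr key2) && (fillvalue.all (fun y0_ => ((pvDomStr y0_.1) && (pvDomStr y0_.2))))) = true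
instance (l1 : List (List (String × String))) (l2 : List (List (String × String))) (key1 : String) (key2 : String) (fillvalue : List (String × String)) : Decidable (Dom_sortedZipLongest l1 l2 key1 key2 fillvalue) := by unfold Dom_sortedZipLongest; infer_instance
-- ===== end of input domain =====

-- B replaces A's element-wise iterator merge by grouping each sorted list into runs of
-- equal keys and merge-walking the run streams, zip-longest-padding each run pair with
-- fillvalue (objective: alternative algorithm; equality of the RETURN value is proved).

-- shared helper: d[k] / d.get(k) as first-match association-list lookup, total form
-- with default "" — exact under Pre_ (the key is present in every dict)
def pvGet (d : List (String × String)) (k : String) : String :=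
  (List.lookup k d).getD ""

-- ===== PORT A =====
-- A's while loop, state = (current element?, rest of iterator) for each side, written as
-- structural recursion on the two remaining lists (u is the head, next() is the tail)
def mergeA (key1 key2 : String) (fill : List (String × String)) :
    List (List (String × String)) → List (List (String × String)) →
    List ((List (String × String)) × (List (String × String)))
  | [], [] => []
  | [], v :: r2 => (fill, v) :: mergeA key1 key2 fill [] r2
  | u :: r1, [] => (u, fill) :: mergeA key1 key2 fill r1 []
  | u :: r1, v :: r2 =>
    if pvGet u key1 = pvGet v key2 then (u, v) :: mergeA key1 key2 fill r1 r2
    else if pvGet u key1 < pvGet v key2 then (u, fill) :: mergeA key1 key2 fill r1 (v :: r2)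
    else (fill, v) :: mergeA key1 key2 fill (u :: r1) r2
termination_by s1 s2 => s1.length + s2.length
decreasing_by all_goals (simp only [List.length_cons]; omega)

def sortedZipLongest (l1 : List (List (String × String))) (l2 : List (List (String × String))) (key1 : String) (key2 : String) (fillvalue : List (String × String)) : List ((List (String × String)) × (List (String × String))) :=
  mergeA key1 key2 fillvalue
    (PySem.List.sorted l1 (fun x => pvGet x key1) false)
    (PySem.List.sorted l2 (fun x => pvGet x key2) false)

-- ===== PORT B =====
-- runs(lst, key): split into maximal runs of equal key (Source B's recursive runs helper)
def runsB (k : String) :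
    List (List (String × String)) → List (String × List (List (String × String)))
  | [] => []
  | d :: rest =>
    (pvGet d k, d :: rest.takeWhile (fun e => pvGet e k == pvGet d k)) ::
      runsB k (rest.dropWhile (fun e => pvGet e k == pvGet d k))
termination_by l => l.length
decreasing_by
  simp only [List.length_cons]
  exact Nat.lt_succ_of_le (List.dropWhile_sublist _).length_le

-- pad(g1, g2): zip the two groups, the shorter one padded with fillvalue
def padB (fill : List (String × String))
    (g1 g2 : List (List (String × String))) :
    List ((List (String × String)) × (List (String × String))) :=
  (g1 ++ List.replicate (max g1.length g2.length - g1.length) fill).zip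
    (g2 ++ List.replicate (max g1.length g2.length - g2.length) fill)

-- the merge-walk over the two run streams (Source B's index loops)
def mergeB (fill : List (String × String)) :
    List (String × List (List (String × String))) →
    List (String × List (List (String × String))) →
    List ((List (String × String)) × (List (String × String)))
  | [], r2 => r2.flatMap (fun p => padB fill [] p.2)
  | r1, [] => r1.flatMap (fun p => padB fill p.2 [])
  | (a, g1) :: r1, (b, g2) :: r2 =>
    if a = b then padB fill g1 g2 ++ mergeB fill r1 r2
    else if a < b then padB fill g1 [] ++ mergeB fill r1 ((b, g2) :: r2)
    else padB fill [] g2 ++ mergeB fill ((a, g1) :: r1) r2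
termination_by r1 r2 => r1.length + r2.length
decreasing_by all_goals (simp only [List.length_cons]; omega)

def sortedZipLongest_alt (l1 : List (List (String × String))) (l2 : List (List (String × String))) (key1 : String) (key2 : String) (fillvalue : List (String × String)) : List ((List (String × String)) × (List (String × String))) :=
  mergeB fillvalue
    (runsB key1 (PySem.List.sorted l1 (fun x => pvGet x key1) false))
    (runsB key2 (PySem.List.sorted l2 (fun x => pvGet x key2) false))

-- ===== PRECONDITION & SPEC =====
-- A raises KeyError (at the sort, on first next()) when key1 is missing from some dict
-- of l1 or key2 from some dict of l2; Pre_ excludes exactly those inputs.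
def Pre_sortedZipLongest (l1 : List (List (String × String))) (l2 : List (List (String × String))) (key1 : String) (key2 : String) (fillvalue : List (String × String)) : Prop :=
  (∀ d ∈ l1, (List.lookup key1 d).isSome = true) ∧
  (∀ d ∈ l2, (List.lookup key2 d).isSome = true)
instance (l1 : List (List (String × String))) (l2 : List (List (String × String))) (key1 : String) (key2 : String) (fillvalue : List (String × String)) : Decidable (Pre_sortedZipLongest l1 l2 key1 key2 fillvalue) := by unfold Pre_sortedZipLongest; infer_instance

def pvWitness_sortedZipLongest : (List (List (String × String))) × (List (List (String × String))) × String × String × (List (String × String)) :=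
  ([[("k", "a")], [("k", "b")]], [[("k", "b"), ("x", "1")]], "k", "k", [])

def Spec_sortedZipLongest (l1 : List (List (String × String))) (l2 : List (List (String × String))) (key1 : String) (key2 : String) (fillvalue : List (String × String)) (out : List ((List (String × String)) × (List (String × String)))) : Prop := out = sortedZipLongest_alt l1 l2 key1 key2 fillvalue
instance (l1 : List (List (String × String))) (l2 : List (List (String × String))) (key1 : String) (key2 : String) (fillvalue : List (String × String)) (out : List ((List (String × String)) × (List (String × String)))) : Decidable (Spec_sortedZipLongest l1 l2 key1 key2 fillvalue out) := by unfold Spec_sortedZipLongest; infer_instance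

-- ===== CLAIM (what is proved, stated in full; the proofs are below) =====
def Claim_equal_sortedZipLongest : Prop := ∀ (l1 : List (List (String × String))) (l2 : List (List (String × String))) (key1 : String) (key2 : String) (fillvalue : List (String × String)), Dom_sortedZipLongest l1 l2 key1 key2 fillvalue → Pre_sortedZipLongest l1 l2 key1 key2 fillvalue → Spec_sortedZipLongest l1 l2 key1 key2 fillvalue (sortedZipLongest l1 l2 key1 key2 fillvalue)

-- ===== LEMMAS AND PROOFS =====

theorem padB_nil_nil (f : List (String × String)) : padB f [] [] = [] := by
  simp [padB]

theorem padB_nil_cons (f v : List (String × String)) (g : List (List (String × String))) :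
    padB f [] (v :: g) = (f, v) :: padB f [] g := by
  simp [padB, List.replicate_succ]

theorem padB_cons_nil (f u : List (String × String)) (g : List (List (String × String))) :
    padB f (u :: g) [] = (u, f) :: padB f g [] := by
  simp [padB, List.replicate_succ]

theorem padB_cons_cons (f u v : List (String × String))
    (g1 g2 : List (List (String × String))) :
    padB f (u :: g1) (v :: g2) = (u, v) :: padB f g1 g2 := by
  simp [padB, Nat.succ_max_succ, Nat.succ_sub_succ]

theorem padB_nil_eq_map (f : List (String × String)) (g : List (List (String × String))) :
    padB f [] g = g.map (fun v => (f, v)) := by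
  induction g with
  | nil => simp [padB]
  | cons v g ih => rw [padB_nil_cons, ih]; rfl

theorem padB_eq_map_nil (f : List (String × String)) (g : List (List (String × String))) :
    padB f g [] = g.map (fun u => (u, f)) := by
  induction g with
  | nil => simp [padB]
  | cons u g ih => rw [padB_cons_nil, ih]; rfl

theorem mergeA_nil_left (k1 k2 : String) (f : List (String × String))
    (s : List (List (String × String))) :
    mergeA k1 k2 f [] s = s.map (fun v => (f, v)) := by
  induction s with
  | nil => simp [mergeA]
  | cons v s ih => rw [mergeA, ih]; rfl

theorem mergeA_nil_right (k1 k2 : String) (f : List (String × String))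
    (s : List (List (String × String))) :
    mergeA k1 k2 f s [] = s.map (fun u => (u, f)) := by
  induction s with
  | nil => simp [mergeA]
  | cons u s ih => rw [mergeA, ih]; rfl

theorem runsB_flat (k : String) (s : List (List (String × String))) :
    (runsB k s).flatMap (fun p => p.2) = s := by
  induction s using runsB.induct k with
  | case1 => simp [runsB]
  | case2 d rest ih =>
    rw [runsB]
    simp only [List.flatMap_cons, ih, List.cons_append]
    simp [List.takeWhile_append_dropWhile]

theorem mergeB_nil_left (f : List (String × String))
    (rs : List (String × List (List (String × String)))) :
    mergeB f [] rs = (rs.flatMap (fun p => p.2)).map (fun v => (f, v)) := by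
  rw [mergeB]
  simp [padB_nil_eq_map, List.map_flatMap]

theorem mergeB_nil_right (f : List (String × String))
    (rs : List (String × List (List (String × String)))) :
    mergeB f rs [] = (rs.flatMap (fun p => p.2)).map (fun u => (u, f)) := by
  cases rs with
  | nil => simp [mergeB]
  | cons p rs => rw [mergeB] <;> simp [padB_eq_map_nil, List.map_flatMap]

theorem mergeA_run (k1 k2 : String) (f : List (String × String)) (a : String)
    (t1 t2 : List (List (String × String)))
    (ht1 : ∀ x ∈ t1, a < pvGet x k1) (ht2 : ∀ y ∈ t2, a < pvGet y k2) :
    ∀ (g1 g2 : List (List (String × String))),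
      (∀ x ∈ g1, pvGet x k1 = a) → (∀ y ∈ g2, pvGet y k2 = a) →
      mergeA k1 k2 f (g1 ++ t1) (g2 ++ t2) = padB f g1 g2 ++ mergeA k1 k2 f t1 t2 := by
  intro g1
  induction g1 with
  | nil =>
    intro g2
    induction g2 with
    | nil => intro _ _; simp [padB_nil_nil]
    | cons v g2' ih2 =>
      intro hg1 hg2
      have hv : pvGet v k2 = a := hg2 v (List.mem_cons_self ..)
      have key : mergeA k1 k2 f t1 (v :: (g2' ++ t2)) =
          (f, v) :: mergeA k1 k2 f t1 (g2' ++ t2) := by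
        cases t1 with
        | nil => rw [mergeA]
        | cons x t1' =>
          have hx := ht1 x (List.mem_cons_self ..)
          rw [mergeA, if_neg (by rw [hv]; exact ne_of_gt hx),
            if_neg (by rw [hv]; exact not_lt.mpr (le_of_lt hx))]
      have h2 := ih2 hg1 (fun y hy => hg2 y (List.mem_cons_of_mem _ hy))
      simp only [List.nil_append] at h2 ⊢
      rw [List.cons_append, key, h2, padB_nil_cons, List.cons_append]
  | cons u g1' ih =>
    intro g2 hg1 hg2
    have hu : pvGet u k1 = a := hg1 u (List.mem_cons_self ..)
    cases g2 with
    | nil =>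
      have key : mergeA k1 k2 f (u :: (g1' ++ t1)) t2 =
          (u, f) :: mergeA k1 k2 f (g1' ++ t1) t2 := by
        cases t2 with
        | nil => rw [mergeA]
        | cons y t2' =>
          have hy := ht2 y (List.mem_cons_self ..)
          rw [mergeA, if_neg (by rw [hu]; exact ne_of_lt hy),
            if_pos (by rw [hu]; exact hy)]
      have h2 := ih [] (fun x hx => hg1 x (List.mem_cons_of_mem _ hx))
        (by intro y hy; cases hy)
      simp only [List.nil_append] at h2 ⊢
      rw [List.cons_append, key, h2, padB_cons_nil, List.cons_append]
    | cons v g2' =>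
      have hv : pvGet v k2 = a := hg2 v (List.mem_cons_self ..)
      have h2 := ih g2' (fun x hx => hg1 x (List.mem_cons_of_mem _ hx))
        (fun y hy => hg2 y (List.mem_cons_of_mem _ hy))
      rw [List.cons_append, List.cons_append, mergeA, if_pos (by rw [hu, hv]),
        h2, padB_cons_cons, List.cons_append]

theorem merge_eq_aux (k1 k2 : String) (f : List (String × String)) :
    ∀ (n : Nat) (s1 s2 : List (List (String × String))),
      s1.length + s2.length ≤ n →
      s1.Pairwise (fun x y => pvGet x k1 ≤ pvGet y k1) →
      s2.Pairwise (fun x y => pvGet x k2 ≤ pvGet y k2) →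
      mergeA k1 k2 f s1 s2 = mergeB f (runsB k1 s1) (runsB k2 s2) := by
  intro n
  induction n with
  | zero =>
    intro s1 s2 hlen _ _
    have h1 : s1 = [] := by cases s1 <;> simp_all
    have h2 : s2 = [] := by cases s2 <;> simp_all
    subst h1; subst h2
    simp [mergeA, mergeB, runsB]
  | succ n ih =>
    intro s1 s2 hlen h1 h2
    cases s1 with
    | nil =>
      rw [mergeA_nil_left, runsB, mergeB_nil_left, runsB_flat]
    | cons u rest1 =>
      cases s2 with
      | nil =>
        rw [mergeA_nil_right, runsB, mergeB_nil_right, runsB_flat]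
      | cons v rest2 =>
        have hle1 : ∀ x ∈ rest1, pvGet u k1 ≤ pvGet x k1 := (List.pairwise_cons.mp h1).1
        have hpw1 : rest1.Pairwise (fun x y => pvGet x k1 ≤ pvGet y k1) :=
          (List.pairwise_cons.mp h1).2
        have hle2 : ∀ y ∈ rest2, pvGet v k2 ≤ pvGet y k2 := (List.pairwise_cons.mp h2).1
        have hpw2 : rest2.Pairwise (fun x y => pvGet x k2 ≤ pvGet y k2) :=
          (List.pairwise_cons.mp h2).2
        -- the first run of each side
        have hg1 : ∀ x ∈ u :: rest1.takeWhile (fun e => pvGet e k1 == pvGet u k1),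
            pvGet x k1 = pvGet u k1 := by
          intro x hx
          rcases List.mem_cons.mp hx with rfl | hx
          · rfl
          · simpa using List.mem_takeWhile_imp hx
        have hg2 : ∀ y ∈ v :: rest2.takeWhile (fun e => pvGet e k2 == pvGet v k2),
            pvGet y k2 = pvGet v k2 := by
          intro y hy
          rcases List.mem_cons.mp hy with rfl | hy
          · rfl
          · simpa using List.mem_takeWhile_imp hy
        have ht1 : ∀ x ∈ rest1.dropWhile (fun e => pvGet e k1 == pvGet u k1),
            pvGet u k1 < pvGet x k1 := by
          intro x hx
          rcases hd : rest1.dropWhile (fun e => pvGet e k1 == pvGet u k1) with _ | ⟨w, t⟩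
          · rw [hd] at hx; cases hx
          · have hne : rest1.dropWhile (fun e => pvGet e k1 == pvGet u k1) ≠ [] := by simp [hd]
            have hwf := List.head_dropWhile_not (fun e => pvGet e k1 == pvGet u k1) hne
            rw [hd] at hx
            simp only [hd, List.head_cons, beq_eq_false_iff_ne, ne_eq] at hwf
            have hwmem : w ∈ rest1 := (List.dropWhile_sublist _).subset (by rw [hd]; exact List.mem_cons_self ..)
            have hwgt : pvGet u k1 < pvGet w k1 := lt_of_le_of_ne (hle1 w hwmem) (Ne.symm hwf)
            rcases List.mem_cons.mp hx with rfl | hx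
            · exact hwgt
            · have hdpw : (w :: t).Pairwise (fun x y => pvGet x k1 ≤ pvGet y k1) := by
                rw [← hd]; exact hpw1.sublist (List.dropWhile_sublist _)
              exact lt_of_lt_of_le hwgt ((List.pairwise_cons.mp hdpw).1 x hx)
        have ht2 : ∀ y ∈ rest2.dropWhile (fun e => pvGet e k2 == pvGet v k2),
            pvGet v k2 < pvGet y k2 := by
          intro y hy
          rcases hd : rest2.dropWhile (fun e => pvGet e k2 == pvGet v k2) with _ | ⟨w, t⟩
          · rw [hd] at hy; cases hy
          · have hne : rest2.dropWhile (fun e => pvGet e k2 == pvGet v k2) ≠ [] := by simp [hd]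
            have hwf := List.head_dropWhile_not (fun e => pvGet e k2 == pvGet v k2) hne
            rw [hd] at hy
            simp only [hd, List.head_cons, beq_eq_false_iff_ne, ne_eq] at hwf
            have hwmem : w ∈ rest2 := (List.dropWhile_sublist _).subset (by rw [hd]; exact List.mem_cons_self ..)
            have hwgt : pvGet v k2 < pvGet w k2 := lt_of_le_of_ne (hle2 w hwmem) (Ne.symm hwf)
            rcases List.mem_cons.mp hy with rfl | hy
            · exact hwgt
            · have hdpw : (w :: t).Pairwise (fun x y => pvGet x k2 ≤ pvGet y k2) := by
                rw [← hd]; exact hpw2.sublist (List.dropWhile_sublist _)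
              exact lt_of_lt_of_le hwgt ((List.pairwise_cons.mp hdpw).1 y hy)
        have hpwd1 : (rest1.dropWhile (fun e => pvGet e k1 == pvGet u k1)).Pairwise
            (fun x y => pvGet x k1 ≤ pvGet y k1) := hpw1.sublist (List.dropWhile_sublist _)
        have hpwd2 : (rest2.dropWhile (fun e => pvGet e k2 == pvGet v k2)).Pairwise
            (fun x y => pvGet x k2 ≤ pvGet y k2) := hpw2.sublist (List.dropWhile_sublist _)
        have hld1 : (rest1.dropWhile (fun e => pvGet e k1 == pvGet u k1)).length ≤ rest1.length :=
          (List.dropWhile_sublist _).length_le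
        have hld2 : (rest2.dropWhile (fun e => pvGet e k2 == pvGet v k2)).length ≤ rest2.length :=
          (List.dropWhile_sublist _).length_le
        have e1 : u :: rest1 = (u :: rest1.takeWhile (fun e => pvGet e k1 == pvGet u k1)) ++
            rest1.dropWhile (fun e => pvGet e k1 == pvGet u k1) := by
          rw [List.cons_append, List.takeWhile_append_dropWhile]
        have e2 : v :: rest2 = (v :: rest2.takeWhile (fun e => pvGet e k2 == pvGet v k2)) ++
            rest2.dropWhile (fun e => pvGet e k2 == pvGet v k2) := by
          rw [List.cons_append, List.takeWhile_append_dropWhile]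
        simp only [List.length_cons] at hlen
        rw [runsB, runsB, mergeB]
        by_cases hab : pvGet u k1 = pvGet v k2
        · rw [if_pos hab]
          have run := mergeA_run k1 k2 f (pvGet u k1) _ _ ht1
            (by intro y hy; rw [hab]; exact ht2 y hy)
            (u :: rest1.takeWhile (fun e => pvGet e k1 == pvGet u k1))
            (v :: rest2.takeWhile (fun e => pvGet e k2 == pvGet v k2))
            hg1 (by intro y hy; rw [hab]; exact hg2 y hy)
          rw [e1, e2, run, ih _ _ (by omega) hpwd1 hpwd2]
        · rw [if_neg hab]
          by_cases hlt : pvGet u k1 < pvGet v k2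
          · rw [if_pos hlt]
            have run := mergeA_run k1 k2 f (pvGet u k1) _ (v :: rest2) ht1
              (by
                intro y hy
                rcases List.mem_cons.mp hy with rfl | hy
                · exact hlt
                · exact lt_of_lt_of_le hlt (hle2 y hy))
              (u :: rest1.takeWhile (fun e => pvGet e k1 == pvGet u k1)) []
              hg1 (by intro y hy; cases hy)
            simp only [List.nil_append] at run
            have ihx := ih (rest1.dropWhile (fun e => pvGet e k1 == pvGet u k1)) (v :: rest2)
              (by simp only [List.length_cons]; omega) hpwd1 h2
            rw [runsB] at ihx
            rw [e1, run, ihx]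
          · rw [if_neg hlt]
            have hgt : pvGet v k2 < pvGet u k1 :=
              lt_of_le_of_ne (le_of_not_gt hlt) (fun h => hab h.symm)
            have run := mergeA_run k1 k2 f (pvGet v k2) (u :: rest1) _
              (by
                intro x hx
                rcases List.mem_cons.mp hx with rfl | hx
                · exact hgt
                · exact lt_of_lt_of_le hgt (hle1 x hx))
              ht2 []
              (v :: rest2.takeWhile (fun e => pvGet e k2 == pvGet v k2))
              (by intro x hx; cases hx) hg2
            simp only [List.nil_append] at run
            have ihx := ih (u :: rest1) (rest2.dropWhile (fun e => pvGet e k2 == pvGet v k2))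
              (by simp only [List.length_cons]; omega) h1 hpwd2
            rw [runsB] at ihx
            rw [e2, run, ihx]

-- ===== VERDICT (by name: the statement is the Claim_ definition above) =====
theorem sortedZipLongest_spec : Claim_equal_sortedZipLongest := by
  intro l1 l2 key1 key2 fillvalue _hdom _hpre
  unfold Spec_sortedZipLongest sortedZipLongest sortedZipLongest_alt
  exact merge_eq_aux key1 key2 fillvalue _ _ _ le_rfl
    (PySem.List.sorted_pairwise ..) (PySem.List.sorted_pairwise ..)
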